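-- pv_equiv track=rewrite | github.com/rNLKJA/Australia-Social-Media-Analytics-on-the-Cloud | 4_Python_data_processing/scripts/ass1.py | num_tw_per_gcc
-- ===== SOURCE A (Python) =====
-- def num_tw_per_gcc(I_lst):
--     num_tw_per_gcc_dict = {}
--     for i in I_lst:
--         # get the greater capital city
--         loc = i[-4:]
--
--         # if this is the first time this author made twitter in this city,then number of twitter is 1
--         if loc not in num_tw_per_gcc_dict:
--             num_tw_per_gcc_dict[loc] = 1
--         # increase the number of twitters made in that greater capital city
--         else:
--             num_tw_per_gcc_dict[loc] += 1
--
--     return num_tw_per_gcc_dict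
-- ===== SOURCE B (Python) =====
-- def _runs(xs):
--     # run-length encode a list with equal elements adjacent (e.g. a sorted list):
--     # advance an index over each maximal run of equal elements and record its size
--     out = []
--     j, n = 0, len(xs)
--     while j < n:
--         k = j + 1
--         while k < n and xs[k] == xs[j]:
--             k += 1
--         out.append((xs[j], k - j))
--         j = k
--     return out
--
--
-- def num_tw_per_gcc(I_lst):
--     # sort the grouping keys so equal keys are adjacent, size each run in one grouped
--     # pass, then rebuild the mapping in first-occurrence order of the original list
--     counts = dict(_runs(sorted(i[-4:] for i in I_lst)))
--     return {i[-4:]: counts[i[-4:]] for i in I_lst}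
-- ===== Notes on version B (the rewrite author's own statement) =====
-- stated objective: alternative
-- what changed: Replaces A's incremental hash-increment loop by a sort-and-group algorithm: sort the last-4-char keys so equal keys are adjacent, run-length-encode the sorted list to get each group's size in one grouped pass, then rebuild the dict in first-occurrence order.
import Mathlib
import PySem

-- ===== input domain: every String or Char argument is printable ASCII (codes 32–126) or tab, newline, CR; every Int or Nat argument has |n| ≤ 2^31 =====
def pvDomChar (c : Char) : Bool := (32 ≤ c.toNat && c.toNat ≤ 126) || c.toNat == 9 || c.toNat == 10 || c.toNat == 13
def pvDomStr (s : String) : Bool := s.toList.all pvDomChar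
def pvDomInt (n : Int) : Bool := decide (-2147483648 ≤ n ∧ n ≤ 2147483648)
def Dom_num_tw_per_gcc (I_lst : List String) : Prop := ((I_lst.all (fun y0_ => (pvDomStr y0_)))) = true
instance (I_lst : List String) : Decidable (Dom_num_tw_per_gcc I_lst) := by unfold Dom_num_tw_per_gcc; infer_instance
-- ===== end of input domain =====

-- B replaces A's incremental dict-increment loop by sort + run-length grouping + an insertion-order rebuild (alternative algorithm, not faster).

-- ===== PORT A =====
def num_tw_per_gcc (I_lst : List String) : List (String × Int) :=
  (I_lst.foldl (fun d i =>
      let loc := PySem.Str.slice i (some (-4)) none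
      if d.contains loc = false then d.insert loc 1
      else d.modify loc 0 (· + 1))
    PySem.Dict.empty).items

-- ===== PORT B =====
-- _runs: the outer 'while j < n' walks the remaining suffix xs[j:], here carried as the list itself;
-- the inner 'while k < n and xs[k] == xs[j]' scan is the length of 'rest.takeWhile (· == x)', the
-- next suffix xs[k:] is 'rest.dropWhile (· == x)', and 'out.append((xs[j], k - j))' is the cons — exact.
def pvRuns : List String → List (String × Int)
  | [] => []
  | x :: rest =>
    (x, 1 + ((rest.takeWhile (· == x)).length : Int)) :: pvRuns (rest.dropWhile (· == x))
termination_by s => s.length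
decreasing_by simpa using Nat.lt_succ_of_le (List.length_dropWhile_le _ _)

def num_tw_per_gcc_alt (I_lst : List String) : List (String × Int) :=
  let counts := (pvRuns (PySem.List.sorted (I_lst.map (fun i => PySem.Str.slice i (some (-4)) none)) (fun x => x) false)).foldl
      (fun d p => d.insert p.1 p.2) PySem.Dict.empty
  -- counts[i[-4:]] : the key is always present (it came from the same list), so getD 0 is exact here
  (I_lst.foldl (fun d i =>
      let loc := PySem.Str.slice i (some (-4)) none
      d.insert loc (counts.getD loc 0)) PySem.Dict.empty).items

-- ===== PRECONDITION & SPEC =====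
def Spec_num_tw_per_gcc (I_lst : List String) (out : List (String × Int)) : Prop := out = num_tw_per_gcc_alt I_lst
instance (I_lst : List String) (out : List (String × Int)) : Decidable (Spec_num_tw_per_gcc I_lst out) := by unfold Spec_num_tw_per_gcc; infer_instance

-- ===== CLAIM (what is proved, stated in full; the proofs are below) =====
def Claim_equal_num_tw_per_gcc : Prop := ∀ (I_lst : List String), Dom_num_tw_per_gcc I_lst → Spec_num_tw_per_gcc I_lst (num_tw_per_gcc I_lst)

-- ===== LEMMAS AND PROOFS =====
-- A's loop step is exactly Counter's step: when the key is absent, inserting 1 is modify with default 0.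
lemma step_eq (d : PySem.Dict String Int) (loc : String) :
    (if d.contains loc = false then d.insert loc 1 else d.modify loc 0 (· + 1))
      = d.modify loc 0 (· + 1) := by
  by_cases h : d.contains loc = false
  · simp [h, PySem.Dict.modify, PySem.Dict.getD_of_not_contains (h := h)]
  · simp [h]

-- Set.add folding below a fresh head commutes with the cons
lemma foldl_add_cons (x : String) (l : List String) (s : List String) (hx : x ∉ l) :
    l.foldl PySem.Set.add (x :: s) = x :: l.foldl PySem.Set.add s := by
  induction l generalizing s with
  | nil => rfl
  | cons y ys ih =>
    have hyx : y ≠ x := fun h => hx (h ▸ List.mem_cons_self)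
    have hx' : x ∉ ys := fun h => hx (List.mem_cons_of_mem _ h)
    by_cases hc : PySem.Set.contains s y = true
    · have h1 : PySem.Set.add (x :: s) y = x :: s := by
        simp [PySem.Set.add, PySem.Set.contains] at hc ⊢; tauto
      have hm : y ∈ s := by simpa [PySem.Set.contains] using hc
      have h2 : PySem.Set.add s y = s := by simp [PySem.Set.add, PySem.Set.contains, hm]
      rw [List.foldl_cons, List.foldl_cons, h1, h2, ih _ hx']
    · have h1 : PySem.Set.add (x :: s) y = x :: (s ++ [y]) := by
        simp [PySem.Set.add, PySem.Set.contains] at hc ⊢; tauto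
      have hm : y ∉ s := by simpa [PySem.Set.contains] using hc
      have h2 : PySem.Set.add s y = s ++ [y] := by simp [PySem.Set.add, PySem.Set.contains, hm]
      rw [List.foldl_cons, List.foldl_cons, h1, h2, ih _ hx']

-- Set.add of elements already present changes nothing
lemma foldl_add_const (x : String) (t : List String) (s : List String)
    (ht : ∀ y ∈ t, y = x) (hs : PySem.Set.contains s x = true) :
    t.foldl PySem.Set.add s = s := by
  induction t with
  | nil => rfl
  | cons y ys ih =>
    have hy : y = x := ht y List.mem_cons_self
    simp only [List.foldl_cons, PySem.Set.add, hy, hs, if_true]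
    exact ih (fun z hz => ht z (List.mem_cons_of_mem _ hz))

-- dedup of a leading run followed by a tail avoiding its value
lemma dedup_split (x : String) (t d : List String)
    (ht : ∀ y ∈ t, y = x) (hxd : x ∉ d) :
    PySem.List.dedup (x :: (t ++ d)) = x :: PySem.List.dedup d := by
  simp only [PySem.List.dedup, PySem.Set.ofList, List.foldl_cons, List.foldl_append]
  have h0 : PySem.Set.add PySem.Set.empty x = [x] := rfl
  rw [h0, foldl_add_const x t [x] ht (by simp [PySem.Set.contains])]
  exact foldl_add_cons x d [] hxd

-- run-length encoding of a ≤-sorted list lists each distinct value once with its multiplicity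
lemma runs_sorted (s : List String) (hs : s.Pairwise (· ≤ ·)) :
    pvRuns s = (PySem.List.dedup s).map (fun k => (k, (s.count k : Int))) := by
  induction s using pvRuns.induct with
  | case1 => simp [pvRuns]
  | case2 x rest ih =>
    set t := rest.takeWhile (· == x) with htdef
    set d := rest.dropWhile (· == x) with hddef
    have hsplit : t ++ d = rest := List.takeWhile_append_dropWhile
    have ht : ∀ y ∈ t, y = x := by
      intro y hy
      have := List.mem_takeWhile_imp hy
      simpa using this
    have hrest_le : ∀ y ∈ rest, x ≤ y := by
      intro y hy; exact (List.pairwise_cons.mp hs).1 y hy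
    have hrest_pw : rest.Pairwise (· ≤ ·) := (List.pairwise_cons.mp hs).2
    have hd_pw : d.Pairwise (· ≤ ·) := hrest_pw.sublist (List.dropWhile_sublist _)
    have hxd : x ∉ d := by
      intro hmem
      cases hd : d with
      | nil => simp [hd] at hmem
      | cons h tl =>
        have hh : ¬ (h == x) = true := by
          have := List.head?_dropWhile_not (· == x) rest
          rw [← hddef] at this; simp [hd] at this; simpa using this
        have hhx : h ≠ x := by simpa using hh
        have hhle : x ≤ h := hrest_le h (by
          have : h ∈ d := by simp [hd]
          exact (List.dropWhile_sublist _ (l := rest)).mem this)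
        rw [hd] at hmem
        rcases List.mem_cons.mp hmem with h1 | h1
        · exact hhx h1.symm
        · have : h ≤ x := (List.pairwise_cons.mp (hd ▸ hd_pw)).1 x h1
          exact hhx (le_antisymm this hhle)
    have hdedup : PySem.List.dedup (x :: rest) = x :: PySem.List.dedup d := by
      rw [← hsplit]; exact dedup_split x t d ht hxd
    have hcount_t : t.count x = t.length := by
      rw [List.count_eq_length.mpr]; intro y hy; exact ((ht y hy) ▸ rfl)
    have hcount_d : d.count x = 0 := List.count_eq_zero.mpr hxd
    have hcx : (x :: rest).count x = 1 + t.length := by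
      rw [← hsplit]; simp [List.count_append, hcount_t, hcount_d]; omega
    have hck : ∀ k ∈ PySem.List.dedup d, (x :: rest).count k = d.count k := by
      intro k hk
      have hkd : k ∈ d := (PySem.List.mem_dedup _ _).mp hk
      have hkx : k ≠ x := fun h => hxd (h ▸ hkd)
      have hkt : k ∉ t := fun h => hkx (ht k h)
      rw [← hsplit]
      simp [List.count_append, List.count_eq_zero.mpr hkt, Ne.symm hkx]
    simp only [pvRuns]
    rw [hdedup, List.map_cons]
    congr 1
    · rw [← htdef, hcx]; simp
    · rw [ih hd_pw]
      exact List.map_congr_left (fun k hk => by simp [hck k hk])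

-- a loop of inserts whose value depends only on the key: the final lookup
lemma getD_insert_loop (g : String → Int) (ks : List String) (d : PySem.Dict String Int)
    (k : String) (c : Int) :
    (ks.foldl (fun d k => d.insert k (g k)) d).getD k c
      = if k ∈ ks then g k else d.getD k c := by
  induction ks generalizing d with
  | nil => simp
  | cons x xs ih =>
    simp only [List.foldl_cons, ih, List.mem_cons]
    by_cases hx : k ∈ xs
    · simp [hx]
    · by_cases hk : k = x
      · simp [hk, PySem.Dict.getD_insert_self]
      · simp [hx, hk, PySem.Dict.getD_insert_of_ne _ _ _ hk]

-- a loop of inserts whose value depends only on the key: the items list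
lemma items_insert_loop (g : String → Int) (ks : List String) :
    (ks.foldl (fun d k => d.insert k (g k)) PySem.Dict.empty).items
      = (PySem.List.dedup ks).map (fun k => (k, g k)) := by
  have hkeys : (ks.foldl (fun d k => d.insert k (g k)) PySem.Dict.empty).keys
      = PySem.List.dedup ks := by
    rw [PySem.Dict.keys_foldl_insert]
    simp [PySem.Set.update, PySem.Set.ofList, PySem.Dict.keys_empty, PySem.List.dedup]
  have hnd : (ks.foldl (fun d k => d.insert k (g k)) PySem.Dict.empty).keys.Nodup := by
    apply PySem.Dict.nodup_keys_foldl_insert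
    simp [PySem.Dict.keys_empty]
  rw [PySem.Dict.items_eq_map_keys _ hnd 0, hkeys]
  apply List.map_congr_left
  intro k hk
  rw [getD_insert_loop]
  simp [(PySem.List.mem_dedup _ _).mp hk]

-- ===== VERDICT (by name: the statement is the Claim_ definition above) =====
theorem num_tw_per_gcc_spec : Claim_equal_num_tw_per_gcc := by
  intro I_lst _
  unfold Spec_num_tw_per_gcc num_tw_per_gcc num_tw_per_gcc_alt
  simp only [step_eq]
  rw [← List.foldl_map (f := fun i => PySem.Str.slice i (some (-4)) none)
        (g := fun (d : PySem.Dict String Int) loc => d.modify loc 0 (· + 1))]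
  rw [← PySem.Dict.counter_eq_foldl, PySem.Dict.items_counter]
  set locs : List String := I_lst.map (fun i => PySem.Str.slice i (some (-4)) none) with hlocs
  set s : List String := PySem.List.sorted locs (fun x => x) false with hsdef
  have hpw : s.Pairwise (· ≤ ·) := by
    simpa [hsdef] using PySem.List.sorted_pairwise (xs := locs) (key := fun x => x)
  rw [runs_sorted _ hpw, List.foldl_map]
  dsimp only
  set C : PySem.Dict String Int :=
    List.foldl (fun d y => d.insert y ((s.count y : Int))) PySem.Dict.empty (PySem.List.dedup s) with hCdef
  have hC : ∀ k, k ∈ locs → C.getD k 0 = (locs.count k : Int) := by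
    intro k hk
    have hks : k ∈ s := by rw [hsdef, PySem.List.mem_sorted]; exact hk
    rw [hCdef, getD_insert_loop]
    simp [hk,
      (PySem.List.sorted_perm (xs := locs) (key := fun x => x) (rev := false)).count_eq, hsdef]
  rw [← List.foldl_map (f := fun i => PySem.Str.slice i (some (-4)) none)
        (g := fun (d : PySem.Dict String Int) loc => d.insert loc (C.getD loc 0)), ← hlocs]
  rw [items_insert_loop (fun loc => C.getD loc 0) locs]
  simp only [PySem.List.dedup_eq_ofList]
  exact List.map_congr_left (fun k hk => by
    rw [hC k ((PySem.List.mem_dedup locs k).mp (by simpa using hk))])
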